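-- pv_equiv track=rewrite | github.com/MakiDevelop/ting-data-etl | hash-mapper-web/services/hash_converter.py | detect_hash_column
-- ===== SOURCE A (Python) =====
-- from typing import Iterator, Callable, Optional
--
-- def detect_hash_column(fieldnames: list[str]) -> tuple[Optional[str], str]:
--     """
--     自動偵測 hash 欄位
--
--     Returns:
--         (欄位名稱, hash_type) 或 (None, '')
--     """
--     phone_keywords = ['phone', 'mobile', '手機', '電話', 'hashedphone']
--     email_keywords = ['email', 'mail', '信箱', 'hashedemail']
--
--     fieldnames_lower = [f.lower() for f in fieldnames]
--
--     # 優先找 phone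
--     for i, fname in enumerate(fieldnames_lower):
--         for kw in phone_keywords:
--             if kw in fname:
--                 return fieldnames[i], 'phone'
--
--     # 再找 email
--     for i, fname in enumerate(fieldnames_lower):
--         for kw in email_keywords:
--             if kw in fname:
--                 return fieldnames[i], 'email'
--
--     # 都找不到，檢查是否只有一個欄位（可能是純 hash 列表）
--     if len(fieldnames) == 1:
--         return fieldnames[0], 'phone'  # 預設為 phone
--
--     return None, ''
-- ===== SOURCE B (Python) =====
-- from typing import Optional
--
-- PHONE_KEYWORDS = ['phone', 'mobile', '手機', '電話', 'hashedphone']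
-- EMAIL_KEYWORDS = ['email', 'mail', '信箱', 'hashedemail']
--
--
-- def detect_hash_column(fieldnames: list[str]) -> tuple[Optional[str], str]:
--     """Single pass: remember the first phone-matching and first email-matching
--     field; decide phone-before-email at the end."""
--     phone_match: Optional[str] = None
--     email_match: Optional[str] = None
--     for f in fieldnames:
--         low = f.lower()
--         if phone_match is None and any(kw in low for kw in PHONE_KEYWORDS):
--             phone_match = f
--         if email_match is None and any(kw in low for kw in EMAIL_KEYWORDS):
--             email_match = f
--     if phone_match is not None:
--         return phone_match, 'phone'
--     if email_match is not None:
--         return email_match, 'email'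
--     if len(fieldnames) == 1:
--         return fieldnames[0], 'phone'
--     return None, ''
-- ===== Notes on version B (the rewrite author's own statement) =====
-- stated objective: alternative
-- what changed: Replaces A's two sequential full scans over a precomputed lowered list with a single pass that keeps two Option accumulators (first phone match, first email match) and decides phone-over-email priority once at the end.
import Mathlib
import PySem

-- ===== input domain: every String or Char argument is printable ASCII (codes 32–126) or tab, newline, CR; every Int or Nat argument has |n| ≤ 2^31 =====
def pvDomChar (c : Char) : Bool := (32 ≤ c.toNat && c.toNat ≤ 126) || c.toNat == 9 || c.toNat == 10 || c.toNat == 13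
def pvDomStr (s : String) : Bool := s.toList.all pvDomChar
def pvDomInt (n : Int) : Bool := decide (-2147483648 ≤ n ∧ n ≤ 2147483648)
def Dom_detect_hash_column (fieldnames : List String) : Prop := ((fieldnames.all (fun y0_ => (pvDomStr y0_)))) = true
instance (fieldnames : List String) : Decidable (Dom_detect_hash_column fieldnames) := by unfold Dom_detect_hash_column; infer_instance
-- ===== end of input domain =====

-- B makes one pass keeping first-phone/first-email accumulators instead of A's two sequential scans; alternative decomposition, same cost.


-- ===== PORT A =====
def pvPhoneKws : List String := ["phone", "mobile", "手機", "電話", "hashedphone"]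
def pvEmailKws : List String := ["email", "mail", "信箱", "hashedemail"]

-- A's nested "for i, fname … for kw …: return fieldnames[i]" over the original list
-- and the precomputed lowered list, as structural recursion on the two lists in step.
def pvScanA (orig low : List String) (kws : List String) : Option String :=
  match orig, low with
  | o :: os, l :: ls =>
      if kws.any (fun kw => PySem.Str.isIn kw l) then some o else pvScanA os ls kws
  | _, _ => none

def detect_hash_column (fieldnames : List String) : Option String × String :=
  let fieldnames_lower := fieldnames.map PySem.Str.lower
  match pvScanA fieldnames fieldnames_lower pvPhoneKws with
  | some f => (some f, "phone")
  | none =>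
    match pvScanA fieldnames fieldnames_lower pvEmailKws with
    | some f => (some f, "email")
    | none =>
      if fieldnames.length = 1 then (fieldnames.head?, "phone")
      else (none, "")

-- ===== PORT B =====
-- B's single pass with two Option accumulators, set only on the first match each.
def pvScanB (fs : List String) (pm em : Option String) : Option String × Option String :=
  match fs with
  | [] => (pm, em)
  | f :: rest =>
    let low := PySem.Str.lower f
    let pm' := if pm.isNone && pvPhoneKws.any (fun kw => PySem.Str.isIn kw low) then some f else pm
    let em' := if em.isNone && pvEmailKws.any (fun kw => PySem.Str.isIn kw low) then some f else em
    pvScanB rest pm' em'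

def detect_hash_column_alt (fieldnames : List String) : Option String × String :=
  match pvScanB fieldnames none none with
  | (some f, _) => (some f, "phone")
  | (none, some f) => (some f, "email")
  | (none, none) =>
    if fieldnames.length = 1 then (fieldnames.head?, "phone")
    else (none, "")

-- ===== PRECONDITION & SPEC =====
def Spec_detect_hash_column (fieldnames : List String) (out : Option String × String) : Prop := out = detect_hash_column_alt fieldnames
instance (fieldnames : List String) (out : Option String × String) : Decidable (Spec_detect_hash_column fieldnames out) := by unfold Spec_detect_hash_column; infer_instance

-- ===== CLAIM (what is proved, stated in full; the proofs are below) =====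
def Claim_equal_detect_hash_column : Prop := ∀ (fieldnames : List String), Dom_detect_hash_column fieldnames → Spec_detect_hash_column fieldnames (detect_hash_column fieldnames)

-- ===== LEMMAS AND PROOFS =====

-- first field (in original casing) whose lowered form contains a keyword of kws
def pvFirst (kws : List String) (fs : List String) : Option String :=
  fs.find? (fun f => kws.any (fun kw => PySem.Str.isIn kw (PySem.Str.lower f)))

theorem pvFirst_cons (kws : List String) (f : String) (rest : List String) :
    pvFirst kws (f :: rest) =
      if kws.any (fun kw => PySem.Str.isIn kw (PySem.Str.lower f)) then some f
      else pvFirst kws rest := by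
  unfold pvFirst
  rw [List.find?_cons]
  cases h : kws.any (fun kw => PySem.Str.isIn kw (PySem.Str.lower f)) <;> simp

theorem pvScanA_eq (fs kws : List String) :
    pvScanA fs (fs.map PySem.Str.lower) kws = pvFirst kws fs := by
  induction fs with
  | nil => rfl
  | cons f rest ih =>
    rw [List.map_cons, pvScanA, pvFirst_cons, ih]

theorem pvScanB_eq (fs : List String) (pm em : Option String) :
    pvScanB fs pm em = (pm.or (pvFirst pvPhoneKws fs), em.or (pvFirst pvEmailKws fs)) := by
  induction fs generalizing pm em with
  | nil => simp [pvScanB, pvFirst]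
  | cons f rest ih =>
    rw [pvScanB]
    cases pm <;> cases em <;>
      cases hp : pvPhoneKws.any (fun kw => PySem.Str.isIn kw (PySem.Str.lower f)) <;>
      cases he : pvEmailKws.any (fun kw => PySem.Str.isIn kw (PySem.Str.lower f)) <;>
      simp only [ih, pvFirst_cons, hp, he, Option.isNone_none, Option.isNone_some,
        Bool.true_and, Bool.false_and, if_true, if_false, Option.none_or, Option.some_or,
        Bool.false_eq_true]

-- ===== VERDICT (by name: the statement is the Claim_ definition above) =====
theorem detect_hash_column_spec : Claim_equal_detect_hash_column := by
  intro fs _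
  show detect_hash_column fs = detect_hash_column_alt fs
  simp only [detect_hash_column, detect_hash_column_alt, pvScanA_eq, pvScanB_eq,
    Option.none_or]
  cases pvFirst pvPhoneKws fs <;> cases pvFirst pvEmailKws fs <;> rfl
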